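-- pv_equiv track=rewrite | github.com/a645162/MarkdownTools | MdUtils/Parser/ParseMdStruct.py | is_title
-- ===== SOURCE A (Python) =====
-- def is_title(text):
--     text1 = text.strip()
--     i = 0
--     while i < len(text1) and text1[i] == '#':
--         i += 1
--
--     if 0 < i < len(text1) and text1[i] == " ":
--         return i + 1 < len(text1)
--     else:
--         return False
-- ===== SOURCE B (Python) =====
-- def is_title(text):
--     hashes, _, rest = text.strip().partition(" ")
--     return rest != "" and hashes != "" and set(hashes) == {"#"}
-- ===== Notes on version B (the rewrite author's own statement) =====
-- stated objective: idiomatic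
-- what changed: Replaces A's manual index-based hash-counting while-loop and chained bounds/index guards with a single str.partition at the first space plus a set-equality test that the prefix is a nonempty run of hashes.
import Mathlib
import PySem

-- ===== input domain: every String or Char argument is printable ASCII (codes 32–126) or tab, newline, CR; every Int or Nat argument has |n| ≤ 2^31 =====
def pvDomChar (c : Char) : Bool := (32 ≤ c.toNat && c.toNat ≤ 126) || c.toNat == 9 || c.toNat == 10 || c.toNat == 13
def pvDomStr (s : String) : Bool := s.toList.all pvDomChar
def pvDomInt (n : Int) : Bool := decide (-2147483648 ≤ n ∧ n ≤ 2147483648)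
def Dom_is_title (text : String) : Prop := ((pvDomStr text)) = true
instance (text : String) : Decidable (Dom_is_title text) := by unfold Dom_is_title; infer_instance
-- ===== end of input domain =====

-- B replaces A's manual hash-counting loop and guard chain by one partition at the
-- first space plus a membership test on the prefix (objective: simpler/idiomatic).

-- ===== PORT A =====
-- the while loop: count leading '#' characters
def pvCountHash : List Char → Nat
  | [] => 0
  | c :: cs => if c = '#' then pvCountHash cs + 1 else 0

def is_title (text : String) : Bool :=
  let text1 := (PySem.Str.strip text).toList
  let i := pvCountHash text1
  if 0 < i ∧ i < text1.length ∧ text1.getD i ' ' = ' ' then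
    decide (i + 1 < text1.length)
  else
    false

-- ===== PORT B =====
-- hand port of str.partition(" "): none = no space; some (before, after) otherwise
def pvPartSp : List Char → Option (List Char × List Char)
  | [] => none
  | c :: cs => if c = ' ' then some ([], cs)
               else (pvPartSp cs).map (fun p => (c :: p.1, p.2))

def is_title_alt (text : String) : Bool :=
  match pvPartSp (PySem.Str.strip text).toList with
  | none => false                       -- no space: rest == ""
  | some (hashes, rest) =>
      decide (rest ≠ []) && decide (hashes ≠ []) && hashes.all (fun c => c == '#')

-- ===== PRECONDITION & SPEC =====
def Spec_is_title (text : String) (out : Bool) : Prop := out = is_title_alt text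
instance (text : String) (out : Bool) : Decidable (Spec_is_title text out) := by unfold Spec_is_title; infer_instance

-- ===== CLAIM (what is proved, stated in full; the proofs are below) =====
def Claim_equal_is_title : Prop := ∀ (text : String), Dom_is_title text → Spec_is_title text (is_title text)

-- ===== LEMMAS AND PROOFS =====

-- the '0 < i' / 'hashes ≠ []' guards dropped on both sides: this version agrees head-onwards
lemma pv_aux (L : List Char) :
    ((decide (pvCountHash L < L.length) && (L.getD (pvCountHash L) ' ' == ' ')) &&
      decide (pvCountHash L + 1 < L.length))
    = match pvPartSp L with
      | none => false
      | some p => p.1.all (fun c => c == '#') && decide (p.2 ≠ []) := by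
  induction L with
  | nil => simp [pvCountHash, pvPartSp]
  | cons c cs ih =>
    by_cases hc : c = '#'
    · subst hc
      have : pvPartSp ('#' :: cs) = (pvPartSp cs).map (fun p => ('#' :: p.1, p.2)) := by
        simp [pvPartSp]
      rw [this]
      cases hp : pvPartSp cs with
      | none =>
        rw [hp] at ih
        simpa [pvCountHash, List.getD, Nat.succ_lt_succ_iff] using ih
      | some p =>
        rw [hp] at ih
        simpa [pvCountHash, List.getD, Nat.succ_lt_succ_iff] using ih
    · by_cases hs : c = ' '
      · subst hs
        simp [pvCountHash, pvPartSp, List.getD, List.ne_nil_iff_length_pos]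
      · have hs' : (c == ' ') = false := by simp [hs]
        have hc' : (c == '#') = false := by simp [hc]
        cases hp : pvPartSp cs <;>
          simp [pvCountHash, pvPartSp, hc, hs, hp, List.getD, hs', hc']

lemma pv_core (L : List Char) :
    (if 0 < pvCountHash L ∧ pvCountHash L < L.length ∧ L.getD (pvCountHash L) ' ' = ' ' then
        decide (pvCountHash L + 1 < L.length)
      else false)
    = match pvPartSp L with
      | none => false
      | some p => decide (p.2 ≠ []) && decide (p.1 ≠ []) && p.1.all (fun c => c == '#') := by
  cases L with
  | nil => simp [pvCountHash, pvPartSp]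
  | cons c cs =>
    by_cases hc : c = '#'
    · subst hc
      have h := pv_aux ('#' :: cs)
      have hcnt : 0 < pvCountHash ('#' :: cs) := by simp [pvCountHash]
      cases hp : pvPartSp ('#' :: cs) with
      | none =>
        rw [hp] at h
        replace h : (decide (pvCountHash ('#' :: cs) < ('#' :: cs).length) &&
            (('#' :: cs).getD (pvCountHash ('#' :: cs)) ' ' == ' ') &&
            decide (pvCountHash ('#' :: cs) + 1 < ('#' :: cs).length)) = false := h
        show (if _ then _ else false) = false
        split_ifs with hcond
        · obtain ⟨-, h1, h2⟩ := hcond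
          rw [decide_eq_true h1, beq_iff_eq.mpr h2, Bool.true_and, Bool.true_and] at h
          exact h
        · rfl
      | some p =>
        have hph : p.1 ≠ [] := by
          rcases p with ⟨p1, p2⟩
          simp only [pvPartSp] at hp
          split at hp
          · simp at *
          · cases hq : pvPartSp cs with
            | none => rw [hq] at hp; simp at hp
            | some q => rw [hq] at hp; simp at hp; simp [← hp.1]
        rw [hp] at h
        replace h : (decide (pvCountHash ('#' :: cs) < ('#' :: cs).length) &&
            (('#' :: cs).getD (pvCountHash ('#' :: cs)) ' ' == ' ') &&
            decide (pvCountHash ('#' :: cs) + 1 < ('#' :: cs).length))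
            = ((p.1.all fun c => c == '#') && decide (p.2 ≠ [])) := h
        show (if _ then _ else false)
            = (decide (p.2 ≠ []) && decide (p.1 ≠ []) && p.1.all (fun c => c == '#'))
        split_ifs with hcond
        · obtain ⟨-, h1, h2⟩ := hcond
          rw [decide_eq_true h1, beq_iff_eq.mpr h2, Bool.true_and, Bool.true_and] at h
          rw [h, decide_eq_true hph, Bool.and_true, Bool.and_comm]
        · have hAB : (decide (pvCountHash ('#' :: cs) < ('#' :: cs).length) &&
              (('#' :: cs).getD (pvCountHash ('#' :: cs)) ' ' == ' ')) = false := by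
            by_cases h1 : pvCountHash ('#' :: cs) < ('#' :: cs).length
            · have h2 : ¬ (('#' :: cs).getD (pvCountHash ('#' :: cs)) ' ' = ' ') :=
                fun hx => hcond ⟨hcnt, h1, hx⟩
              rw [beq_eq_false_iff_ne.mpr h2, Bool.and_false]
            · rw [decide_eq_false h1, Bool.false_and]
          rw [hAB, Bool.false_and] at h
          rcases Bool.and_eq_false_iff.mp h.symm with hx | hx
          · rw [hx, Bool.and_false]
          · rw [hx, Bool.false_and, Bool.false_and]
    · by_cases hs : c = ' '
      · subst hs
        have h0 : pvCountHash (' ' :: cs) = 0 := by simp [pvCountHash]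
        simp [pvPartSp, h0]
      · have h0 : pvCountHash (c :: cs) = 0 := by simp [pvCountHash, hc]
        rw [h0]
        cases hp : pvPartSp (c :: cs) with
        | none => simp
        | some p =>
          have : p.1.all (fun x => x == '#') = false := by
            rcases p with ⟨p1, p2⟩
            simp only [pvPartSp, if_neg hs] at hp
            cases hq : pvPartSp cs with
            | none => rw [hq] at hp; simp at hp
            | some q =>
              rw [hq] at hp; simp at hp
              simp [← hp.1, List.all_cons, hc]
          simp [this]

-- ===== VERDICT (by name: the statement is the Claim_ definition above) =====
theorem is_title_spec : Claim_equal_is_title := by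
  intro text _
  unfold Spec_is_title is_title is_title_alt
  have h := pv_core (PySem.Str.strip text).toList
  simp only at h ⊢
  rw [h]
  cases pvPartSp (PySem.Str.strip text).toList with
  | none => rfl
  | some p => rfl
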